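-- pv_equiv track=rewrite | github.com/KwonYoungbin/Programmers-Practice | Python/Level4/사칙연산.py | solution
-- ===== SOURCE A (Python) =====
-- from collections import deque
--
-- def solution(arr):
--     adder = 0
--     arr = deque(arr[::-1])
--     min_val = 0
--     max_val = 0
--     prev = 0
--     while arr:
--         now = arr.popleft()
--         if now == "-":
--             temp_min = min_val
--             temp_max = max_val
--             min_val = min(-(adder + temp_max), -adder + temp_min)
--             max_val = max(-(adder + temp_min), -prev + (adder - prev) + temp_max)
--             adder = 0
--         elif now == '+':
--             continue
--         else:
--             adder += int(now)
--             prev = int(now)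
--
--     return max_val + adder
-- ===== SOURCE B (Python) =====
-- def solution(arr):
--     # Phase 1: scan right-to-left, summarising the numbers between '-' tokens
--     # into segments (in scan order); '+' tokens are ignored.
--     segs = []
--     cur = []
--     for t in reversed(arr):
--         if t == "-":
--             segs.append(cur)
--             cur = []
--         elif t == "+":
--             pass
--         else:
--             cur.append(int(t))
--     segs.append(cur)
--     # Phase 2: fold the (min,max) recurrence over the segment summaries.
--     lo = hi = prev = 0
--     for seg in segs[:-1]:
--         s = sum(seg)
--         p = seg[-1] if seg else prev
--         lo, hi = min(-(s + hi), lo - s), max(-(s + lo), s - 2 * p + hi)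
--         prev = p
--     return hi + sum(segs[-1])
-- ===== Notes on version B (the rewrite author's own statement) =====
-- stated objective: simpler
-- what changed: A's single reversed-deque while-loop with a 4-scalar token-level state machine is restructured into two plain phases: first summarise the numbers between '-' tokens into segment lists, then fold the (min,max,prev) recurrence once over those segments.
import Mathlib
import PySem

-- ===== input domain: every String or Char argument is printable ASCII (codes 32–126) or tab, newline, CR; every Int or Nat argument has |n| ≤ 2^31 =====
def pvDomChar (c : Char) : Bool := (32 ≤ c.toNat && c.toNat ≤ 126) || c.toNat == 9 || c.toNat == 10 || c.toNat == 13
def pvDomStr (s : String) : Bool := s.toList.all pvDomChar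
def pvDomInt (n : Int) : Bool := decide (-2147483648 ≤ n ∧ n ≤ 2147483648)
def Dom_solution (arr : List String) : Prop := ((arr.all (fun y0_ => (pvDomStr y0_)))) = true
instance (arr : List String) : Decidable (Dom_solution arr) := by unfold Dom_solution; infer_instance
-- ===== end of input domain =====

-- B restructures A's reversed token-level state machine into two phases (segment
-- summaries between '-' tokens, then a fold of the (min,max) recurrence); objective: simpler.

-- ===== PORT A =====
-- A's while-loop over the reversed deque: state (adder, min_val, max_val, prev).
-- int(now) is ported as (ofStr? now).getD 0; Pre_solution excludes the inputs where it is none (ValueError).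
def solGo : List String → Int → Int → Int → Int → Int
  | [], adder, _mn, mx, _prev => mx + adder
  | now :: rest, adder, mn, mx, prev =>
    if now = "-" then
      solGo rest 0 (min (-(adder + mx)) (-adder + mn))
        (max (-(adder + mn)) (-prev + (adder - prev) + mx)) prev
    else if now = "+" then
      solGo rest adder mn mx prev
    else
      let n := (PySem.Int.ofStr? now).getD 0
      solGo rest (adder + n) mn mx n

def solution (arr : List String) : Int := solGo ((PySem.List.slice? arr none none (-1)).getD []) 0 0 0 0

-- ===== PORT B =====
-- Phase 1 of B: split the reversed tokens on "-" into segments of parsed numbers ('+' ignored).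
def bCollect : List String → List Int → List (List Int)
  | [], cur => [cur]
  | t :: rest, cur =>
    if t = "-" then cur :: bCollect rest []
    else if t = "+" then bCollect rest cur
    else bCollect rest (cur ++ [(PySem.Int.ofStr? t).getD 0])

-- Phase 2 of B: fold the (lo, hi, prev) recurrence over all segments but the last.
def bFold : List (List Int) → Int → Int → Int → Int
  | [], _lo, hi, _prev => hi
  | [seg], _lo, hi, _prev => hi + seg.sum
  | seg :: s2 :: rest, lo, hi, prev =>
    let s := seg.sum
    let p := seg.getLastD prev
    bFold (s2 :: rest) (min (-(s + hi)) (lo - s)) (max (-(s + lo)) (s - 2 * p + hi)) p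

def solution_alt (arr : List String) : Int := bFold (bCollect arr.reverse []) 0 0 0

-- ===== PRECONDITION & SPEC =====
-- Pre_ excludes exactly the inputs where Python A raises ValueError: a token that is
-- neither "-" nor "+" nor parseable by int().
def Pre_solution (arr : List String) : Prop :=
  ∀ s ∈ arr, s = "-" ∨ s = "+" ∨ (PySem.Int.ofStr? s).isSome = true
instance (arr : List String) : Decidable (Pre_solution arr) := by unfold Pre_solution; infer_instance

def pvWitness_solution : List String := ["1", "-", "3", "+", "5"]

def Spec_solution (arr : List String) (out : Int) : Prop := out = solution_alt arr
instance (arr : List String) (out : Int) : Decidable (Spec_solution arr out) := by unfold Spec_solution; infer_instance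

-- ===== CLAIM (what is proved, stated in full; the proofs are below) =====
def Claim_equal_solution : Prop := ∀ (arr : List String), Dom_solution arr → Pre_solution arr → Spec_solution arr (solution arr)

-- ===== LEMMAS AND PROOFS =====

lemma bCollect_ne_nil (ts : List String) (cur : List Int) : bCollect ts cur ≠ [] := by
  induction ts generalizing cur with
  | nil => simp [bCollect]
  | cons t rest ih =>
    simp only [bCollect]
    split_ifs <;> simp [ih]

lemma key (ts : List String) : ∀ cur lo hi prev0,
    bFold (bCollect ts cur) lo hi prev0 = solGo ts cur.sum lo hi (cur.getLastD prev0) := by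
  induction ts with
  | nil => intro cur lo hi prev0; simp [bCollect, bFold, solGo]
  | cons t rest ih =>
    intro cur lo hi prev0
    by_cases hm : t = "-"
    · subst hm
      simp only [bCollect, solGo, String.reduceEq, reduceIte]
      rcases h : bCollect rest [] with _ | ⟨a, l⟩
      · exact absurd h (bCollect_ne_nil rest [])
      · rw [bFold, ← h, ih]
        simp only [List.sum_nil, List.getLastD_nil]
        congr 1 <;> [skip; congr 1] <;> ring_nf
    · by_cases hp : t = "+"
      · subst hp
        simp only [bCollect, solGo, String.reduceEq, reduceIte]
        exact ih cur lo hi prev0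
      · simp only [bCollect, solGo, if_neg hm, if_neg hp]
        rw [ih]
        simp

lemma slice_neg_one (arr : List String) :
    (PySem.List.slice? arr none none (-1)).getD [] = arr.reverse := by
  rw [PySem.List.slice?_none_none_neg_one]; rfl

-- ===== VERDICT (by name: the statement is the Claim_ definition above) =====
theorem solution_spec : Claim_equal_solution := by
  intro arr _ _
  unfold Spec_solution solution solution_alt
  rw [slice_neg_one, key]
  simp
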